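-- pv_equiv track=rewrite | github.com/gilbeckers/HumanPose-and-UrbanScene-Matching | labels.py | chech_same_class
-- ===== SOURCE A (Python) =====
-- posegroups= {
--     "dart":[
--         [1,2,3,4,6,7],
--         [1, 2,13, 4, 7],
--         [8, 10, 11, 12],
--         [1, 9,2],
--         [5],
--         [9]
--     ]
-- }
--
-- def chech_same_class(group, x,y):
--     if group in posegroups:
--         classes = posegroups[group]
--         for a in classes:
--             if x in a and y in a:
--                 return  True
--             #elif (x in a and y not in a) or (x not in a and y in a):
--             #    return False
--
--         return False
--     else:
--         return True
-- ===== SOURCE B (Python) =====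
-- posegroups = {
--     "dart": [
--         [1, 2, 3, 4, 6, 7],
--         [1, 2, 13, 4, 7],
--         [8, 10, 11, 12],
--         [1, 9, 2],
--         [5],
--         [9]
--     ]
-- }
--
--
-- def chech_same_class(group, x, y):
--     if group in posegroups:
--         index = {}
--         for i, sub in enumerate(posegroups[group]):
--             for v in sub:
--                 index.setdefault(v, set()).add(i)
--         return bool(index.get(x, set()) & index.get(y, set()))
--     else:
--         return True
-- ===== Notes on version B (the rewrite author's own statement) =====
-- stated objective: idiomatic
-- what changed: Replaces the per-query scan of all subgroups with two membership tests each by a one-pass inverted index (element value -> set of subgroup indices) and answers via a set intersection; the absent-group True branch is unchanged.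
import Mathlib
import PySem

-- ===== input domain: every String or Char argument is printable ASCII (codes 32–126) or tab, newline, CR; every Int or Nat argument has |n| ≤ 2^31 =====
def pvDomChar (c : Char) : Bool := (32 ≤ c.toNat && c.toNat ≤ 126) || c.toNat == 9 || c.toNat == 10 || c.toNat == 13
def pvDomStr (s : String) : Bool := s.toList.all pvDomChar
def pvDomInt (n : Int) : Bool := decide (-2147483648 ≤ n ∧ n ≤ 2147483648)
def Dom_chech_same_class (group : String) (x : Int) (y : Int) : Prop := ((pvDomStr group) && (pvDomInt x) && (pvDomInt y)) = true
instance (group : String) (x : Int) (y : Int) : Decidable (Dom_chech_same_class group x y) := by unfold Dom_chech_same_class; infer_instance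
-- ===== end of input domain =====

-- B replaces A's scan of the subgroups with membership tests on both x and y by an
-- inverted index (value → set of subgroup indices) built in one pass, answering via a
-- set intersection; objective: idiomatic (same cost on this fixed table).

-- ===== PORT A =====
-- the single entry of the module-level dict posegroups
def dartClasses : List (List Int) :=
  [[1, 2, 3, 4, 6, 7], [1, 2, 13, 4, 7], [8, 10, 11, 12], [1, 9, 2], [5], [9]]

-- 'for a in classes: if x in a and y in a: return True' then 'return False'
def chechLoop (x y : Int) : List (List Int) → Bool
  | [] => false
  | a :: rest => if a.contains x && a.contains y then true else chechLoop x y rest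

def chech_same_class (group : String) (x : Int) (y : Int) : Bool :=
  if group = "dart" then  -- 'group in posegroups'; "dart" is the only key
    chechLoop x y dartClasses
  else
    true

-- ===== PORT B =====
-- index.setdefault(v, set()).add(i), for i, sub in enumerate(...) and v in sub
def buildIndex (classes : List (List Int)) : PySem.Dict Int (PySem.Set Int) :=
  (PySem.List.enumerate classes).foldl
    (fun d p => p.2.foldl
      (fun d v => d.insert v (PySem.Set.add (d.getD v PySem.Set.empty) p.1)) d)
    PySem.Dict.empty

def chech_same_class_alt (group : String) (x : Int) (y : Int) : Bool :=
  if group = "dart" then  -- 'group in posegroups'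
    let index := buildIndex dartClasses
    -- bool(index.get(x, set()) & index.get(y, set()))
    !(PySem.Set.inter (index.getD x PySem.Set.empty) (index.getD y PySem.Set.empty)).isEmpty
  else
    true

-- ===== PRECONDITION & SPEC =====
def Spec_chech_same_class (group : String) (x : Int) (y : Int) (out : Bool) : Prop := out = chech_same_class_alt group x y
instance (group : String) (x : Int) (y : Int) (out : Bool) : Decidable (Spec_chech_same_class group x y out) := by unfold Spec_chech_same_class; infer_instance

-- ===== CLAIM (what is proved, stated in full; the proofs are below) =====
def Claim_equal_chech_same_class : Prop := ∀ (group : String) (x : Int) (y : Int), Dom_chech_same_class group x y → Spec_chech_same_class group x y (chech_same_class group x y)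

-- ===== LEMMAS AND PROOFS =====

-- the index over the fixed table, evaluated once
lemma buildIndex_eval : buildIndex dartClasses =
    PySem.Dict.mk [(1, [0, 1, 3]), (2, [0, 1, 3]), (3, [0]), (4, [0, 1]),
                   (6, [0]), (7, [0, 1]), (13, [1]), (8, [2]), (10, [2]),
                   (11, [2]), (12, [2]), (9, [3, 5]), (5, [4])] := by decide

lemma out_of_range_A (x y : Int) (h : ¬ (1 ≤ x ∧ x ≤ 13) ∨ ¬ (1 ≤ y ∧ y ≤ 13)) :
    chechLoop x y dartClasses = false := by
  have h1 : ∀ z : Int, ¬ (1 ≤ z ∧ z ≤ 13) → ∀ k : Int, 1 ≤ k → k ≤ 13 → (z == k) = false := by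
    intro z hz k hk1 hk2; rw [beq_eq_false_iff_ne]; omega
  cases h with
  | inl hx => simp only [chechLoop, dartClasses, List.contains_cons, List.contains_nil]; simp [h1 x hx]
  | inr hy => simp only [chechLoop, dartClasses, List.contains_cons, List.contains_nil]; simp [h1 y hy]

lemma inter_empty_right (s : PySem.Set Int) : PySem.Set.inter s PySem.Set.empty = PySem.Set.empty := by
  simp [PySem.Set.inter, PySem.Set.empty, PySem.Set.contains]

lemma out_of_range_B (z : Int) (hz : ¬ (1 ≤ z ∧ z ≤ 13)) :
    (buildIndex dartClasses).getD z PySem.Set.empty = PySem.Set.empty := by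
  rw [buildIndex_eval]
  simp only [PySem.Dict.getD, PySem.Dict.get?, List.find?]
  have h1 : ∀ k : Int, 1 ≤ k → k ≤ 13 → (k == z) = false := by
    intro k h1 h2; rw [beq_eq_false_iff_ne]; omega
  simp [h1]

-- ===== VERDICT (by name: the statement is the Claim_ definition above) =====
theorem chech_same_class_spec : Claim_equal_chech_same_class := by
  intro group x y _
  unfold Spec_chech_same_class chech_same_class chech_same_class_alt
  by_cases hg : group = "dart"
  · simp only [hg, if_pos]
    by_cases hx : 1 ≤ x ∧ x ≤ 13
    · by_cases hy : 1 ≤ y ∧ y ≤ 13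
      · obtain ⟨hx1, hx2⟩ := hx; obtain ⟨hy1, hy2⟩ := hy
        interval_cases x <;> interval_cases y <;> decide
      · rw [out_of_range_A x y (Or.inr hy), out_of_range_B y hy, inter_empty_right]
        decide
    · rw [out_of_range_A x y (Or.inl hx), out_of_range_B x hx]
      simp [PySem.Set.inter, PySem.Set.empty]
  · simp [hg]
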